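-- pv_equiv track=rewrite | github.com/lucasabritta/7snake | main.py | findBiggerAndSmaller
-- ===== SOURCE A (Python) =====
-- def findBiggerAndSmaller(valueList):
-- 	bigger = smaller = valueList[0]; # save the value to search
-- 	biggerI = smallerI = 0; #save the index
-- 	for j in range(0, len(valueList)):
-- 		if (bigger < valueList[j]):
-- 			bigger = valueList[j];
-- 			biggerI = j;
-- 		if (smaller > valueList[j]):
-- 			smaller = valueList[j];
-- 			smallerI = j;
-- 	return biggerI, smallerI;
-- ===== SOURCE B (Python) =====
-- def findBiggerAndSmaller(valueList):
--     indices = range(len(valueList))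
--     key = valueList.__getitem__
--     return max(indices, key=key), min(indices, key=key)
-- ===== Notes on version B (the rewrite author's own statement) =====
-- stated objective: idiomatic
-- what changed: Replaces the hand-written four-variable tracking loop with two independent built-in calls max/min over the index range keyed by the list values (both return the first extremal index, matching A's strict-comparison first-occurrence tie-breaking).
import Mathlib
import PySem

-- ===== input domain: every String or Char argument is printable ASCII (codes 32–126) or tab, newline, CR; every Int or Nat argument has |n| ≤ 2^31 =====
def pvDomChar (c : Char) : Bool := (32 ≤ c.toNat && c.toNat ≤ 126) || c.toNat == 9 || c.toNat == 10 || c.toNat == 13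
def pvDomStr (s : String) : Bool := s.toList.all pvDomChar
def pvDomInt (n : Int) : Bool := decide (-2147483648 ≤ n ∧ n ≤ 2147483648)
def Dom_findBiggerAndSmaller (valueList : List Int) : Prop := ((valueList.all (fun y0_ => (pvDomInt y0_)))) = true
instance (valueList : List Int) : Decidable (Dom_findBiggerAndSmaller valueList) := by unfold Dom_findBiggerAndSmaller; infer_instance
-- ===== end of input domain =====

-- B recomputes A's (first max index, first min index) with two independent built-in
-- max/min calls over the index range (idiomatic; same O(n) cost).

-- ===== PORT A =====
-- one loop body step of A: j-th iteration updating (bigger, biggerI, smaller, smallerI)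
def pvStepA (vl : List Int) (st : Int × Int × Int × Int) (j : Int) : Int × Int × Int × Int :=
  let v := PySem.List.pyGetD vl j 0       -- valueList[j]; every j from range(len) is in bounds
  let b  := if st.1 < v then v else st.1
  let bi := if st.1 < v then j else st.2.1
  let s  := if st.2.2.1 > v then v else st.2.2.1
  let si := if st.2.2.1 > v then j else st.2.2.2
  (b, bi, s, si)

def findBiggerAndSmaller (valueList : List Int) : Int × Int :=
  -- valueList[0]: Python raises IndexError on []; Pre_ excludes that input, default never used inside Pre_
  let first := PySem.List.pyGetD valueList 0 0
  let st := (PySem.List.pyRange 0 valueList.length 1).foldl (pvStepA valueList) (first, 0, first, 0)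
  (st.2.1, st.2.2.2)

-- ===== PORT B =====
-- key = valueList.__getitem__ ; every index drawn from range(len) is in bounds
def pvKey (vl : List Int) (i : Int) : Int := PySem.List.pyGetD vl i 0

def findBiggerAndSmaller_alt (valueList : List Int) : Int × Int :=
  let indices := PySem.List.pyRange 0 valueList.length 1
  ((PySem.List.max? indices (pvKey valueList)).getD 0,   -- max(indices, key=key); raises on []: outside Pre_
   (PySem.List.min? indices (pvKey valueList)).getD 0)

-- ===== PRECONDITION & SPEC =====
-- Pre_ excludes only the empty list, on which A raises IndexError (and B raises ValueError).
def Pre_findBiggerAndSmaller (valueList : List Int) : Prop := valueList ≠ []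
instance (valueList : List Int) : Decidable (Pre_findBiggerAndSmaller valueList) := by unfold Pre_findBiggerAndSmaller; infer_instance
def pvWitness_findBiggerAndSmaller : List Int := [3, -1, 3, 7]

def Spec_findBiggerAndSmaller (valueList : List Int) (out : Int × Int) : Prop := out = findBiggerAndSmaller_alt valueList
instance (valueList : List Int) (out : Int × Int) : Decidable (Spec_findBiggerAndSmaller valueList out) := by unfold Spec_findBiggerAndSmaller; infer_instance

-- ===== CLAIM (what is proved, stated in full; the proofs are below) =====
def Claim_equal_findBiggerAndSmaller : Prop := ∀ (valueList : List Int), Dom_findBiggerAndSmaller valueList → Pre_findBiggerAndSmaller valueList → Spec_findBiggerAndSmaller valueList (findBiggerAndSmaller valueList)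

-- ===== LEMMAS AND PROOFS =====

-- pure running first-argmax / first-argmin folds both programs reduce to
def pvGmax (vl : List Int) (m0 : Int) (L : List Int) : Int :=
  L.foldl (fun m x => if pvKey vl m < pvKey vl x then x else m) m0
def pvGmin (vl : List Int) (m0 : Int) (L : List Int) : Int :=
  L.foldl (fun m x => if pvKey vl x < pvKey vl m then x else m) m0

theorem pvFoldA_eq (vl : List Int) (L : List Int) : ∀ (m0 m1 : Int),
    L.foldl (pvStepA vl) (pvKey vl m0, m0, pvKey vl m1, m1)
      = (pvKey vl (pvGmax vl m0 L), pvGmax vl m0 L, pvKey vl (pvGmin vl m1 L), pvGmin vl m1 L) := by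
  induction L with
  | nil => intro m0 m1; simp [pvGmax, pvGmin]
  | cons x t ih =>
    intro m0 m1
    have hstep : pvStepA vl (pvKey vl m0, m0, pvKey vl m1, m1) x
        = (pvKey vl (if pvKey vl m0 < pvKey vl x then x else m0),
           (if pvKey vl m0 < pvKey vl x then x else m0),
           pvKey vl (if pvKey vl x < pvKey vl m1 then x else m1),
           (if pvKey vl x < pvKey vl m1 then x else m1)) := by
      simp only [pvStepA, pvKey, gt_iff_lt]
      split_ifs <;> rfl
    simp only [List.foldl_cons, hstep, ih, pvGmax, pvGmin]

theorem pvMax?_cons (vl : List Int) (L : List Int) : ∀ (m0 : Int),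
    PySem.List.max? (m0 :: L) (pvKey vl) = some (pvGmax vl m0 L) := by
  induction L with
  | nil => intro m0; simp [PySem.List.max?, pvGmax]
  | cons x t ih =>
    intro m0
    have h1 : PySem.List.max? (m0 :: x :: t) (pvKey vl)
        = PySem.List.max? ((if pvKey vl m0 < pvKey vl x then x else m0) :: t) (pvKey vl) := by
      simp only [PySem.List.max?, List.foldl_cons]
      split_ifs <;> rfl
    rw [h1, ih]
    simp only [pvGmax, List.foldl_cons]

theorem pvMin?_cons (vl : List Int) (L : List Int) : ∀ (m0 : Int),
    PySem.List.min? (m0 :: L) (pvKey vl) = some (pvGmin vl m0 L) := by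
  induction L with
  | nil => intro m0; simp [PySem.List.min?, pvGmin]
  | cons x t ih =>
    intro m0
    have h1 : PySem.List.min? (m0 :: x :: t) (pvKey vl)
        = PySem.List.min? ((if pvKey vl x < pvKey vl m0 then x else m0) :: t) (pvKey vl) := by
      simp only [PySem.List.min?, List.foldl_cons]
      split_ifs <;> rfl
    rw [h1, ih]
    simp only [pvGmin, List.foldl_cons]

-- ===== VERDICT (by name: the statement is the Claim_ definition above) =====
theorem findBiggerAndSmaller_spec : Claim_equal_findBiggerAndSmaller := by
  intro vl _ hpre
  unfold Spec_findBiggerAndSmaller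
  have hlen : (0 : Int) < vl.length := by
    cases vl with
    | nil => exact absurd rfl hpre
    | cons a t => simp
  have hrange : PySem.List.pyRange 0 vl.length 1 = 0 :: PySem.List.pyRange 1 vl.length 1 := by
    simpa using PySem.List.pyRange_one_cons hlen
  have hk0 : pvKey vl 0 = PySem.List.pyGetD vl 0 0 := rfl
  -- A side
  have hfirst : pvStepA vl (pvKey vl 0, 0, pvKey vl 0, 0) 0 = (pvKey vl 0, 0, pvKey vl 0, 0) := by
    simp [pvStepA, pvKey]
  have hA : findBiggerAndSmaller vl
      = (pvGmax vl 0 (PySem.List.pyRange 1 vl.length 1), pvGmin vl 0 (PySem.List.pyRange 1 vl.length 1)) := by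
    simp only [findBiggerAndSmaller, hrange, List.foldl_cons, ← hk0, hfirst,
      pvFoldA_eq vl (PySem.List.pyRange 1 vl.length 1) 0 0]
  -- B side
  have hB : findBiggerAndSmaller_alt vl
      = (pvGmax vl 0 (PySem.List.pyRange 1 vl.length 1), pvGmin vl 0 (PySem.List.pyRange 1 vl.length 1)) := by
    simp only [findBiggerAndSmaller_alt, hrange, pvMax?_cons, pvMin?_cons, Option.getD_some]
  rw [hA, hB]
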